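-- pv_equiv track=rewrite | github.com/wmjones/amy-project | src/organization_logic/engine.py | _sanitize_path_component
-- ===== SOURCE A (Python) =====
-- def _sanitize_path_component(component: str) -> str:
--     """Sanitize a path component to be filesystem-safe.
--
--     Args:
--         component: Path component to sanitize
--
--     Returns:
--         Sanitized component
--     """
--     # Remove or replace invalid characters
--     invalid_chars = '<>:"|?*\0'
--     for char in invalid_chars:
--         component = component.replace(char, "")
--
--     # Replace spaces with underscores (optional)
--     component = component.replace(" ", "_")
--
--     # Remove leading/trailing dots and spaces
--     component = component.strip(". ")
--
--     # Limit length
--     max_length = 50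
--     if len(component) > max_length:
--         component = component[:max_length]
--
--     return component or "unnamed"
-- ===== SOURCE B (Python) =====
-- def _sanitize_path_component(component: str) -> str:
--     """Sanitize a path component to be filesystem-safe (single-pass version)."""
--     invalid = set('<>:"|?*\0')
--     cleaned = "".join("_" if ch == " " else ch for ch in component if ch not in invalid)
--     cleaned = cleaned.strip(". ")
--     if len(cleaned) > 50:
--         cleaned = cleaned[:50]
--     return cleaned or "unnamed"
-- ===== Notes on version B (the rewrite author's own statement) =====
-- stated objective: idiomatic
-- what changed: Replaces the eight repeated full-string .replace scans (plus a ninth for spaces) by one membership-tested pass over the input that drops invalid characters and maps spaces to underscores in a single comprehension.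
import Mathlib
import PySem

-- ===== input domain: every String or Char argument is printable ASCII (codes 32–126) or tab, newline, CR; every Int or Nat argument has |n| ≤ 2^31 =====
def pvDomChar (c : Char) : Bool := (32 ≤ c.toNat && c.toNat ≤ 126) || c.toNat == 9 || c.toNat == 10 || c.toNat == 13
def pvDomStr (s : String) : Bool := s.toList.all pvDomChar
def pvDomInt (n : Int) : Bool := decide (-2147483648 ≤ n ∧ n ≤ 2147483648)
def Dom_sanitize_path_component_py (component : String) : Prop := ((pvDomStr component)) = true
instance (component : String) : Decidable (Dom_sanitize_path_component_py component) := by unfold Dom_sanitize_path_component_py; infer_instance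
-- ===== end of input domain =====

-- B replaces A's nine sequential .replace scans by one membership-filtered pass (idiomatic, not claimed faster).

-- ===== PORT A =====
def sanitize_path_component_py (component : String) : String :=
  let invalid_chars : String := "<>:\"|?*\x00"
  let c1 : String := invalid_chars.toList.foldl
    (fun s ch => PySem.Str.replace s (String.ofList [ch]) "") component
  let c2 : String := PySem.Str.replace c1 " " "_"
  let c3 : String := PySem.Str.stripChars c2 ". "
  let c4 : String := if PySem.Str.len c3 > 50 then PySem.Str.slice c3 none (some 50) else c3
  if c4 = "" then "unnamed" else c4

-- ===== PORT B =====
def sanitize_path_component_py_alt (component : String) : String :=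
  let invalid : PySem.Set Char := PySem.Set.ofList "<>:\"|?*\x00".toList
  let cleaned1 : List Char :=
    (component.toList.filter (fun ch => !(invalid.contains ch))).map
      (fun ch => if ch = ' ' then '_' else ch)
  let cleaned2 : List Char := PySem.Chars.stripChars cleaned1 ". ".toList
  let cleaned3 : List Char := if cleaned2.length > 50 then cleaned2.take 50 else cleaned2
  if cleaned3.isEmpty then "unnamed" else String.ofList cleaned3

-- ===== PRECONDITION & SPEC =====
def Spec_sanitize_path_component_py (component : String) (out : String) : Prop := out = sanitize_path_component_py_alt component
instance (component : String) (out : String) : Decidable (Spec_sanitize_path_component_py component out) := by unfold Spec_sanitize_path_component_py; infer_instance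

-- ===== CLAIM (what is proved, stated in full; the proofs are below) =====
def Claim_equal_sanitize_path_component_py : Prop := ∀ (component : String), Dom_sanitize_path_component_py component → Spec_sanitize_path_component_py component (sanitize_path_component_py component)

-- ===== LEMMAS AND PROOFS =====

-- replace with a single-character pattern is a per-character flatMap
lemma pv_replace_go_single (o : Char) (new : List Char) :
    ∀ (l : List Char) (fuel : Nat) (acc : List Char), l.length ≤ fuel →
      PySem.Chars.replace.go [o] new fuel l acc
        = acc.reverse ++ l.flatMap (fun c => if c = o then new else [c]) := by
  intro l
  induction l with
  | nil => intro fuel acc _; cases fuel <;> simp [PySem.Chars.replace.go]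
  | cons c t ih =>
      intro fuel acc h
      cases fuel with
      | zero => simp at h
      | succ n =>
          simp only [PySem.Chars.replace.go]
          by_cases hc : c = o
          · simp [hc, List.isPrefixOf, ih n (new.reverse ++ acc) (by simpa using h)]
          · simp [List.isPrefixOf, Ne.symm hc, hc, ih n (c :: acc) (by simpa using h)]

lemma pv_replace_single (l : List Char) (o : Char) (new : List Char) :
    PySem.Chars.replace l [o] new = l.flatMap (fun c => if c = o then new else [c]) := by
  simpa using pv_replace_go_single o new l l.length [] (le_refl _)

lemma pv_flatMap_del (l : List Char) (o : Char) :
    l.flatMap (fun c => if c = o then [] else [c]) = l.filter (fun c => !(c == o)) := by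
  induction l with
  | nil => rfl
  | cons c t ih => by_cases h : c = o <;> simp [h, ih]

lemma pv_flatMap_sub (l : List Char) (o n : Char) :
    l.flatMap (fun c => if c = o then [n] else [c]) = l.map (fun c => if c = o then n else c) := by
  induction l with
  | nil => rfl
  | cons c t ih => by_cases h : c = o <;> simp [h, ih]

-- the eight nested filters collapse into one membership-tested filter
set_option maxRecDepth 4096 in
lemma pv_filters (l : List Char) :
    ((((((((l.filter (fun c => !(c == '<'))).filter (fun c => !(c == '>'))).filter
      (fun c => !(c == ':'))).filter (fun c => !(c == '"'))).filter
      (fun c => !(c == '|'))).filter (fun c => !(c == '?'))).filter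
      (fun c => !(c == '*'))).filter (fun c => !(c == '\x00')))
    = l.filter (fun ch => !((PySem.Set.ofList "<>:\"|?*\x00".toList).contains ch)) := by
  simp only [List.filter_filter]
  refine List.filter_congr ?_
  intro c _
  rw [PySem.Set.contains_eq_listContains]
  have hL : (PySem.Set.ofList "<>:\"|?*\x00".toList : List Char)
      = ['<', '>', ':', '"', '|', '?', '*', '\x00'] := rfl
  rw [hL]
  simp only [List.contains_cons, List.contains_nil, Bool.or_false, Bool.not_or]
  ac_rfl

-- ===== VERDICT (by name: the statement is the Claim_ definition above) =====
-- the char-removal + space-replacement phase of A equals B's single filter/map pass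
lemma pv_clean_eq (component : String) :
    (PySem.Str.replace ("<>:\"|?*\x00".toList.foldl
        (fun s ch => PySem.Str.replace s (String.ofList [ch]) "") component) " " "_").toList
      = (component.toList.filter
          (fun ch => !((PySem.Set.ofList "<>:\"|?*\x00".toList).contains ch))).map
          (fun ch => if ch = ' ' then '_' else ch) := by
  have hinv : "<>:\"|?*\x00".toList = ['<', '>', ':', '"', '|', '?', '*', '\x00'] := rfl
  rw [hinv]
  simp only [List.foldl_cons, List.foldl_nil, PySem.Str.toList_replace, String.toList_ofList,
    show ("" : String).toList = [] from rfl, show (" " : String).toList = [' '] from rfl,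
    show ("_" : String).toList = ['_'] from rfl]
  rw [pv_replace_single, pv_flatMap_sub]
  rw [pv_replace_single, pv_flatMap_del, pv_replace_single, pv_flatMap_del,
    pv_replace_single, pv_flatMap_del, pv_replace_single, pv_flatMap_del,
    pv_replace_single, pv_flatMap_del, pv_replace_single, pv_flatMap_del,
    pv_replace_single, pv_flatMap_del, pv_replace_single, pv_flatMap_del]
  rw [pv_filters, hinv]

lemma pv_last (L : List Char) :
    (if String.ofList L = "" then "unnamed" else String.ofList L)
      = (if L.isEmpty = true then "unnamed" else String.ofList L) := by
  by_cases h : L = []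
  · simp [h]
  · have hne : ¬ (String.ofList L = "") := by
      intro hc
      exact h (by simpa using congrArg String.toList hc)
    simp [h, hne]

theorem sanitize_path_component_py_spec : Claim_equal_sanitize_path_component_py := by
  intro component _
  unfold Spec_sanitize_path_component_py sanitize_path_component_py sanitize_path_component_py_alt
  simp only []
  set sA := PySem.Str.stripChars (PySem.Str.replace
      (List.foldl (fun s ch => PySem.Str.replace s (String.ofList [ch]) "") component
        "<>:\"|?*\x00".toList) " " "_") ". " with hsA
  set M := PySem.Chars.stripChars
      ((component.toList.filter
          (fun ch => !((PySem.Set.ofList "<>:\"|?*\x00".toList).contains ch))).map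
        (fun ch => if ch = ' ' then '_' else ch)) ". ".toList with hM
  have hS : sA.toList = M := by
    rw [hsA, PySem.Str.toList_stripChars, pv_clean_eq]
  have hlen : PySem.Str.len sA = (M.length : Int) := by rw [PySem.Str.len_eq, hS]
  have hSlice : PySem.Str.slice sA none (some 50) = String.ofList (M.take 50) := by
    rw [← String.toList_inj, PySem.Str.toList_slice, String.toList_ofList, hS]
    rw [PySem.Chars.slice_eq_listSlice, PySem.List.slice_to M (show (0:Int) ≤ 50 by norm_num)]
    norm_num
    rfl
  have hsAeq : sA = String.ofList M := by
    rw [← String.toList_inj, hS, String.toList_ofList]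
  by_cases hgt : 50 < M.length
  · have hc : PySem.Str.len sA > 50 := by
      rw [hlen]; exact_mod_cast hgt
    rw [if_pos hc, if_pos hgt, hSlice]
    exact pv_last _
  · have hc : ¬ (PySem.Str.len sA > 50) := by
      rw [hlen]; exact_mod_cast hgt
    rw [if_neg hc, if_neg hgt, hsAeq]
    exact pv_last _
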